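-- pv_equiv track=rewrite | github.com/corporacionbethelst-ux/Delibery_360-dev | backend/app/utils/lgpd_compliance.py | get_consent_requirements
-- ===== SOURCE A (Python) =====
-- from typing import Dict, List, Any
-- from enum import Enum
--
-- class ConsentType(str, Enum):
--     MARKETING = "marketing"
--     DATA_SHARING = "data_sharing"
--     LOCATION_TRACKING = "location_tracking"
--     ANALYTICS = "analytics"
--     NECESSARY = "necessary"  # No requiere consentimiento explícito
--
-- def get_consent_requirements(data_types: List[str]) -> List[ConsentType]:
--     requirements = []
--
--     if any(t in ['email_marketing', 'sms_marketing', 'push_notifications'] for t in data_types):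
--         requirements.append(ConsentType.MARKETING)
--
--     if any(t in ['data_sharing', 'third_party_access'] for t in data_types):
--         requirements.append(ConsentType.DATA_SHARING)
--
--     if any(t in ['gps_tracking', 'location_history', 'real_time_location'] for t in data_types):
--         requirements.append(ConsentType.LOCATION_TRACKING)
--
--     if any(t in ['analytics', 'behavioral_analysis', 'profiling'] for t in data_types):
--         requirements.append(ConsentType.ANALYTICS)
--
--     return requirements
-- ===== SOURCE B (Python) =====
-- from enum import Enum
--
-- class ConsentType(str, Enum):
--     MARKETING = "marketing"
--     DATA_SHARING = "data_sharing"
--     LOCATION_TRACKING = "location_tracking"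
--     ANALYTICS = "analytics"
--     NECESSARY = "necessary"
--
-- # Inverted index: trigger string -> consent category it requires.
-- _CATEGORY_OF = {
--     "email_marketing": "marketing",
--     "sms_marketing": "marketing",
--     "push_notifications": "marketing",
--     "data_sharing": "data_sharing",
--     "third_party_access": "data_sharing",
--     "gps_tracking": "location_tracking",
--     "location_history": "location_tracking",
--     "real_time_location": "location_tracking",
--     "analytics": "analytics",
--     "behavioral_analysis": "analytics",
--     "profiling": "analytics",
-- }
--
-- _ORDER = [ConsentType.MARKETING, ConsentType.DATA_SHARING,
--           ConsentType.LOCATION_TRACKING, ConsentType.ANALYTICS]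
--
-- def get_consent_requirements(data_types):
--     found = set()
--     for t in data_types:
--         cat = _CATEGORY_OF.get(t)
--         if cat is not None:
--             found.add(cat)
--     return [c for c in _ORDER if c.value in found]
-- ===== Notes on version B (the rewrite author's own statement) =====
-- stated objective: faster
-- what changed: Inverted the mapping: B makes a single pass over the input, classifying each element via a trigger->category dictionary into a found-set, then emits the categories in canonical order; A instead scans the whole input four times, once per category, with any()/list-membership tests.
import Mathlib
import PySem

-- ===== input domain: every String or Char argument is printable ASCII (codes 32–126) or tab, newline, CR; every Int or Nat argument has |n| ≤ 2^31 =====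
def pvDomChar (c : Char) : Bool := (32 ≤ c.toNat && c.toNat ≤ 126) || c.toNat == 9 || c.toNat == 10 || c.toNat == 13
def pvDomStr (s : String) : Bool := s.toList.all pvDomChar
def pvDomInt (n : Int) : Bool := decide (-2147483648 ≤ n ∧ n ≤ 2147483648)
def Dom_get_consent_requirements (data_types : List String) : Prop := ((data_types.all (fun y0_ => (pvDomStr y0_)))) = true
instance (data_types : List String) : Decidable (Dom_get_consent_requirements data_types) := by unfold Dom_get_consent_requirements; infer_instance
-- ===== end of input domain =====

-- B inverts the mapping: one pass over the input classifies each element through a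
-- trigger→category dictionary into a found-set, and the categories are emitted in the
-- fixed canonical order — instead of A's four per-category scans of the input (objective: faster — one dict-classifying pass instead of four any() scans).

-- ===== PORT A =====
def get_consent_requirements (data_types : List String) : List String :=
  let requirements : List String := []
  let requirements :=
    if data_types.any (fun t => ["email_marketing", "sms_marketing", "push_notifications"].contains t)
    then requirements ++ ["marketing"] else requirements
  let requirements :=
    if data_types.any (fun t => ["data_sharing", "third_party_access"].contains t)
    then requirements ++ ["data_sharing"] else requirements
  let requirements :=
    if data_types.any (fun t => ["gps_tracking", "location_history", "real_time_location"].contains t)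
    then requirements ++ ["location_tracking"] else requirements
  let requirements :=
    if data_types.any (fun t => ["analytics", "behavioral_analysis", "profiling"].contains t)
    then requirements ++ ["analytics"] else requirements
  requirements

-- ===== PORT B =====
-- inverted index: trigger string → consent category (Source B's _CATEGORY_OF)
def pvCategoryOf : PySem.Dict String String := PySem.Dict.ofList
  [("email_marketing", "marketing"), ("sms_marketing", "marketing"), ("push_notifications", "marketing"),
   ("data_sharing", "data_sharing"), ("third_party_access", "data_sharing"),
   ("gps_tracking", "location_tracking"), ("location_history", "location_tracking"), ("real_time_location", "location_tracking"),
   ("analytics", "analytics"), ("behavioral_analysis", "analytics"), ("profiling", "analytics")]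

def pvOrder : List String := ["marketing", "data_sharing", "location_tracking", "analytics"]

def get_consent_requirements_alt (data_types : List String) : List String :=
  let found : PySem.Set String :=
    data_types.foldl (fun found t =>
      match PySem.Dict.get? pvCategoryOf t with
      | some cat => PySem.Set.add found cat
      | none => found) PySem.Set.empty
  pvOrder.filter (fun c => PySem.Set.contains found c)

-- ===== PRECONDITION & SPEC =====
def Spec_get_consent_requirements (data_types : List String) (out : List String) : Prop := out = get_consent_requirements_alt data_types
instance (data_types : List String) (out : List String) : Decidable (Spec_get_consent_requirements data_types out) := by unfold Spec_get_consent_requirements; infer_instance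

-- ===== CLAIM (what is proved, stated in full; the proofs are below) =====
def Claim_equal_get_consent_requirements : Prop := ∀ (data_types : List String), Dom_get_consent_requirements data_types → Spec_get_consent_requirements data_types (get_consent_requirements data_types)

-- ===== LEMMAS AND PROOFS =====

-- membership in B's found-set after the single pass
theorem pv_mem_found (d : List String) (acc : PySem.Set String) (c : String) :
    (c ∈ d.foldl (fun found t =>
        match PySem.Dict.get? pvCategoryOf t with
        | some cat => PySem.Set.add found cat
        | none => found) acc)
      ↔ (c ∈ acc ∨ ∃ t ∈ d, PySem.Dict.get? pvCategoryOf t = some c) := by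
  induction d generalizing acc with
  | nil => simp
  | cons x xs ih =>
    simp only [List.foldl_cons]
    rcases h : PySem.Dict.get? pvCategoryOf x with _ | cat
    · rw [ih]
      simp only [List.mem_cons]
      constructor
      · rintro (hc | ⟨t, ht, hg⟩)
        · exact Or.inl hc
        · exact Or.inr ⟨t, Or.inr ht, hg⟩
      · rintro (hc | ⟨t, (rfl | ht), hg⟩)
        · exact Or.inl hc
        · simp [h] at hg
        · exact Or.inr ⟨t, ht, hg⟩
    · rw [ih]
      simp only [PySem.Set.mem_add, List.mem_cons]
      constructor
      · rintro ((hc | rfl) | ⟨t, ht, hg⟩)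
        · exact Or.inl hc
        · exact Or.inr ⟨x, Or.inl rfl, h⟩
        · exact Or.inr ⟨t, Or.inr ht, hg⟩
      · rintro (hc | ⟨t, (rfl | ht), hg⟩)
        · exact Or.inl (Or.inl hc)
        · rw [h] at hg; exact Or.inl (Or.inr (Option.some.injEq _ _ ▸ hg).symm)
        · exact Or.inr ⟨t, ht, hg⟩

-- the literal inverted index in constructor form (for unfolding get?)
theorem pv_table_mk : pvCategoryOf = PySem.Dict.mk
    [("email_marketing", "marketing"), ("sms_marketing", "marketing"), ("push_notifications", "marketing"),
     ("data_sharing", "data_sharing"), ("third_party_access", "data_sharing"),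
     ("gps_tracking", "location_tracking"), ("location_history", "location_tracking"), ("real_time_location", "location_tracking"),
     ("analytics", "analytics"), ("behavioral_analysis", "analytics"), ("profiling", "analytics")] := by decide

-- the inverted index hits category c exactly when t is one of c's trigger strings
set_option maxHeartbeats 1000000 in
theorem pv_get_marketing (t : String) :
    PySem.Dict.get? pvCategoryOf t = some "marketing" ↔
      t ∈ (["email_marketing", "sms_marketing", "push_notifications"] : List String) := by
  rw [pv_table_mk]
  simp only [PySem.Dict.get?_mk_cons, beq_iff_eq]
  split_ifs <;> simp_all [PySem.Dict.get?, eq_comm]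

set_option maxHeartbeats 1000000 in
theorem pv_get_sharing (t : String) :
    PySem.Dict.get? pvCategoryOf t = some "data_sharing" ↔
      t ∈ (["data_sharing", "third_party_access"] : List String) := by
  rw [pv_table_mk]
  simp only [PySem.Dict.get?_mk_cons, beq_iff_eq]
  split_ifs <;> simp_all [PySem.Dict.get?, eq_comm]

set_option maxHeartbeats 1000000 in
theorem pv_get_location (t : String) :
    PySem.Dict.get? pvCategoryOf t = some "location_tracking" ↔
      t ∈ (["gps_tracking", "location_history", "real_time_location"] : List String) := by
  rw [pv_table_mk]
  simp only [PySem.Dict.get?_mk_cons, beq_iff_eq]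
  split_ifs <;> simp_all [PySem.Dict.get?, eq_comm]

set_option maxHeartbeats 1000000 in
theorem pv_get_analytics (t : String) :
    PySem.Dict.get? pvCategoryOf t = some "analytics" ↔
      t ∈ (["analytics", "behavioral_analysis", "profiling"] : List String) := by
  rw [pv_table_mk]
  simp only [PySem.Dict.get?_mk_cons, beq_iff_eq]
  split_ifs <;> simp_all [PySem.Dict.get?, eq_comm]

-- B's found-set membership test for category c equals A's any-scan over c's trigger list
theorem pv_cond (d : List String) (c : String) (triggers : List String)
    (hc : ∀ t, PySem.Dict.get? pvCategoryOf t = some c ↔ t ∈ triggers) :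
    PySem.Set.contains (d.foldl (fun found t =>
        match PySem.Dict.get? pvCategoryOf t with
        | some cat => PySem.Set.add found cat
        | none => found) PySem.Set.empty) c
      = d.any (fun t => triggers.contains t) := by
  rw [Bool.eq_iff_iff]
  simp only [PySem.Set.contains, List.contains_iff_mem, pv_mem_found, PySem.Set.empty,
    List.any_eq_true, hc, List.not_mem_nil, false_or]

-- ===== VERDICT (by name: the statement is the Claim_ definition above) =====
theorem get_consent_requirements_spec : Claim_equal_get_consent_requirements := by
  intro d _
  unfold Spec_get_consent_requirements get_consent_requirements get_consent_requirements_alt pvOrder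
  simp only [List.filter_cons, List.filter_nil,
    pv_cond d "marketing" _ pv_get_marketing,
    pv_cond d "data_sharing" _ pv_get_sharing,
    pv_cond d "location_tracking" _ pv_get_location,
    pv_cond d "analytics" _ pv_get_analytics]
  rcases h1 : d.any (fun t => ["email_marketing", "sms_marketing", "push_notifications"].contains t) with _ | _ <;>
  rcases h2 : d.any (fun t => ["data_sharing", "third_party_access"].contains t) with _ | _ <;>
  rcases h3 : d.any (fun t => ["gps_tracking", "location_history", "real_time_location"].contains t) with _ | _ <;>
  rcases h4 : d.any (fun t => ["analytics", "behavioral_analysis", "profiling"].contains t) with _ | _ <;>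
  simp [h1, h2, h3, h4]
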